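-- pv_equiv track=rewrite | github.com/wangmaidong/pythonStudy | 32_异常.py | with_exceptions
-- ===== SOURCE A (Python) =====
-- def with_exceptions(n):
--     results = []
--     for i in range(n):
--         try:
--             if i % 2 == 0:
--                 raise ValueError("测试异常")
--             results.append(i)
--         except ValueError:
--             pass
--     return results
-- ===== SOURCE B (Python) =====
-- def with_exceptions(n):
--     return list(range(1, n, 2))
-- ===== Notes on version B (the rewrite author's own statement) =====
-- stated objective: simpler
-- what changed: B generates the odd numbers directly with a step-2 range instead of scanning every i in range(n) and skipping evens via a raised-and-caught ValueError.
import Mathlib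
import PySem

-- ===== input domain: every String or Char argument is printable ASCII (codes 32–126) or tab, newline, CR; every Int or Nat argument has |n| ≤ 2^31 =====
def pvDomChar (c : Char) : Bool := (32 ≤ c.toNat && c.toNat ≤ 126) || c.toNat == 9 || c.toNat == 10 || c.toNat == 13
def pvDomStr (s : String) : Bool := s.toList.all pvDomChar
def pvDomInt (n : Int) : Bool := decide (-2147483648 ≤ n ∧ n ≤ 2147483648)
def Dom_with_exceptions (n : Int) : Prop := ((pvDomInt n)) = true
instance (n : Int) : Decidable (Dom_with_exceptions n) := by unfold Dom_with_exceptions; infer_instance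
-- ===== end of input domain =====

-- B replaces A's scan over range(n) with exception-based skipping of evens by a direct
-- step-2 range(1, n, 2): simpler, no exception control flow.

-- ===== PORT A =====
def with_exceptions (n : Int) : List Int :=
  (PySem.List.pyRange 0 n 1).foldl (fun results i =>
    if PySem.Int.mod i 2 == 0 then results   -- raise ValueError → caught → pass
    else results ++ [i]) []

-- ===== PORT B =====
def with_exceptions_alt (n : Int) : List Int :=
  PySem.List.pyRange 1 n 2

-- ===== PRECONDITION & SPEC =====
def Spec_with_exceptions (n : Int) (out : List Int) : Prop := out = with_exceptions_alt n
instance (n : Int) (out : List Int) : Decidable (Spec_with_exceptions n out) := by unfold Spec_with_exceptions; infer_instance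

-- ===== CLAIM (what is proved, stated in full; the proofs are below) =====
def Claim_equal_with_exceptions : Prop := ∀ (n : Int), Dom_with_exceptions n → Spec_with_exceptions n (with_exceptions n)

-- ===== LEMMAS AND PROOFS =====

-- A's loop is 'append i unless i is even': a filter.
theorem pv_loopA (l acc : List Int) :
    l.foldl (fun results i => if PySem.Int.mod i 2 == 0 then results else results ++ [i]) acc
      = acc ++ l.filter (fun i => !(PySem.Int.mod i 2 == 0)) := by
  induction l generalizing acc with
  | nil => simp
  | cons x xs ih =>
    rw [List.foldl_cons, List.filter_cons]
    cases h : (PySem.Int.mod x 2 == 0) with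
    | true =>
      simp only [Bool.not_true, if_true]
      rw [ih]
      simp
    | false =>
      simp only [Bool.not_false, if_false, Bool.false_eq_true]
      rw [ih]
      simp

-- the step-2 range below 1 is empty
theorem pv_r2_nil (n : Int) (h : n ≤ 1) : PySem.List.pyRange 1 n 2 = [] := by
  rw [PySem.List.pyRange_of_pos 1 n (by norm_num)]
  simp [show ¬ (1 < n) by omega]

-- the step-2 range as a map over a Nat range
theorem pv_r2_map (k : Nat) (hk : 2 ≤ k) :
    PySem.List.pyRange 1 (k : Int) 2 = (List.range (k / 2)).map (fun (j : Nat) => 1 + 2 * (j : Int)) := by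
  rw [PySem.List.pyRange_of_pos 1 (k : Int) (by norm_num)]
  have h1 : (1 : Int) < (k : Int) := by exact_mod_cast hk
  have h2 : (((k : Int) - 1 + 2 - 1) / 2).toNat = k / 2 := by omega
  rw [if_pos h1, h2]

theorem pv_key (m : Nat) :
    (PySem.List.pyRange 0 (m : Int) 1).filter (fun i => !(PySem.Int.mod i 2 == 0))
      = PySem.List.pyRange 1 (m : Int) 2 := by
  induction m with
  | zero => decide
  | succ m ih =>
    rcases Nat.eq_zero_or_pos m with hm0 | hm1
    · subst hm0; decide
    · have hc : ((m + 1 : Nat) : Int) = (m : Int) + 1 := by push_cast; ring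
      rw [hc]
      have hsr : PySem.List.pyRange 0 ((m : Int) + 1) 1
          = PySem.List.pyRange 0 (m : Int) 1 ++ [(m : Int)] :=
        PySem.List.pyRange_one_succ_right (by positivity)
      rw [hsr, List.filter_append, ih]
      have hmod : PySem.Int.mod (m : Int) 2 = ((m % 2 : Nat) : Int) := by
        rw [PySem.Int.mod_eq_emod_of_pos (by norm_num : (0:Int) < 2)]
        omega
      by_cases hpar : m % 2 = 1
      · -- m odd: both sides gain [m]
        have hfil : ([(m : Int)].filter (fun i => !(PySem.Int.mod i 2 == 0))) = [(m : Int)] := by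
          simp only [List.filter_cons, List.filter_nil, hmod, hpar]
          norm_num
        rw [hfil]
        rcases Nat.lt_or_ge m 2 with hm2 | hm2
        · interval_cases m
          decide
        · rw [show (m : Int) + 1 = ((m + 1 : Nat) : Int) from hc.symm,
              pv_r2_map m hm2, pv_r2_map (m + 1) (by omega)]
          have : (m + 1) / 2 = m / 2 + 1 := by omega
          rw [this, List.range_succ, List.map_append]
          have h3 : (1 : Int) + 2 * ((m / 2 : Nat) : Int) = (m : Int) := by omega
          simp only [List.map_cons, List.map_nil, h3]
      · -- m even: the new element is filtered out and the count is unchanged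
        have hfil : ([(m : Int)].filter (fun i => !(PySem.Int.mod i 2 == 0))) = [] := by
          simp only [List.filter_cons, List.filter_nil, hmod]
          have h0 : m % 2 = 0 := by omega
          simp [h0]
        rw [hfil, List.append_nil]
        rcases Nat.lt_or_ge m 2 with hm2 | hm2
        · omega
        · rw [show (m : Int) + 1 = ((m + 1 : Nat) : Int) from hc.symm,
              pv_r2_map m hm2, pv_r2_map (m + 1) (by omega)]
          have : (m + 1) / 2 = m / 2 := by omega
          rw [this]

-- ===== VERDICT (by name: the statement is the Claim_ definition above) =====
theorem with_exceptions_spec : Claim_equal_with_exceptions := by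
  intro n _
  unfold Spec_with_exceptions with_exceptions with_exceptions_alt
  rw [pv_loopA, List.nil_append]
  by_cases hn : n ≤ 0
  · rw [PySem.List.pyRange_one_eq_nil hn, pv_r2_nil n (by omega)]
    simp
  · have : n = ((n.toNat : Int)) := by omega
    rw [this]
    exact pv_key n.toNat
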